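-- pv_equiv track=rewrite | github.com/Twodragon0/tech-blog | scripts/upgrade_weekly_digest_korean.py | collect_sections
-- ===== SOURCE A (Python) =====
-- def collect_sections(lines):
--     sections = []
--     i = 0
--     while i < len(lines):
--         line = lines[i]
--         if line.startswith("### "):
--             start = i
--             j = i + 1
--             while (
--                 j < len(lines)
--                 and not lines[j].startswith("### ")
--                 and not lines[j].startswith("## ")
--             ):
--                 j += 1
--             sections.append((start, j))
--             i = j
--             continue
--         i += 1
--     return sections
-- ===== SOURCE B (Python) =====
-- def collect_sections(lines):
--     boundaries = [(k, line) for k, line in enumerate(lines)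
--                   if line.startswith("### ") or line.startswith("## ")]
--     sections = []
--     for idx, (k, line) in enumerate(boundaries):
--         if line.startswith("### "):
--             end = boundaries[idx + 1][0] if idx + 1 < len(boundaries) else len(lines)
--             sections.append((k, end))
--     return sections
-- ===== Notes on version B (the rewrite author's own statement) =====
-- stated objective: alternative
-- what changed: Replaces A's nested while-loop forward scan for each section end by a single pass that first collects all boundary headers ('### ' or '## ') via one enumerate comprehension and then reads each section's end as the next entry of that boundary table (or len(lines)).
import Mathlib
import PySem

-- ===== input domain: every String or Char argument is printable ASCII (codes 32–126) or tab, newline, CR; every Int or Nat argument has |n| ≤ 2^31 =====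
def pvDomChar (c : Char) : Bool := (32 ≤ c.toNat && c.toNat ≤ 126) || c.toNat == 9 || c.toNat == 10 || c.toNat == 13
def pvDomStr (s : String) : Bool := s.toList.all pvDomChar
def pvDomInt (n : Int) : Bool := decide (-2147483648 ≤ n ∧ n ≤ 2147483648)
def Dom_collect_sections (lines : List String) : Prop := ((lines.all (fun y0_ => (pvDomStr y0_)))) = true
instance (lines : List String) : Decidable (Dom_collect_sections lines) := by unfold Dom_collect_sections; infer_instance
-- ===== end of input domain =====

-- B replaces A's nested forward scan by a one-pass boundary table plus next-entry lookup (alternative decomposition, same O(n) cost).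

-- ===== PORT A =====
-- the boundary test "startswith('### ') or startswith('## ')", shared by both ports
def pvIsB (s : String) : Bool :=
  PySem.Str.startswith s "### " || PySem.Str.startswith s "## "

-- inner while loop: j advances while j < len(lines) and lines[j] is not a boundary
-- (lines[j] is always in range here, so getD is exact)
def pvScanA (lines : List String) (j : Nat) : Nat :=
  if j < lines.length ∧ ¬ pvIsB (lines.getD j "") = true then
    pvScanA lines (j + 1)
  else j
termination_by lines.length - j

theorem pvScanA_ge (lines : List String) (j : Nat) : j ≤ pvScanA lines j := by
  unfold pvScanA
  split
  · have := pvScanA_ge lines (j + 1); omega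
  · exact le_refl j
termination_by lines.length - j
decreasing_by
  rename_i h; omega

-- outer while loop over the index i
def pvLoopA (lines : List String) (i : Nat) : List (Int × Int) :=
  if h : i < lines.length then
    if PySem.Str.startswith (lines.getD i "") "### " = true then
      ((i : Int), (pvScanA lines (i + 1) : Int)) :: pvLoopA lines (pvScanA lines (i + 1))
    else pvLoopA lines (i + 1)
  else []
termination_by lines.length - i
decreasing_by
  · have := pvScanA_ge lines (i + 1); omega
  · omega

def collect_sections (lines : List String) : List (Int × Int) := pvLoopA lines 0

-- ===== PORT B =====
-- the for-loop over `boundaries`: end = next boundary's index, or len(lines) for the last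
def pvGoB (n : Int) : List (Int × String) → List (Int × Int)
  | [] => []
  | (k, line) :: rest =>
    if PySem.Str.startswith line "### " = true then
      (k, match rest with
          | [] => n
          | (k', _) :: _ => k') :: pvGoB n rest
    else pvGoB n rest

def collect_sections_alt (lines : List String) : List (Int × Int) :=
  pvGoB (lines.length : Int)
    ((PySem.List.enumerate lines).filter (fun p => pvIsB p.2))

-- ===== PRECONDITION & SPEC =====
def Spec_collect_sections (lines : List String) (out : List (Int × Int)) : Prop := out = collect_sections_alt lines
instance (lines : List String) (out : List (Int × Int)) : Decidable (Spec_collect_sections lines out) := by unfold Spec_collect_sections; infer_instance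

-- ===== CLAIM (what is proved, stated in full; the proofs are below) =====
def Claim_equal_collect_sections : Prop := ∀ (lines : List String), Dom_collect_sections lines → Spec_collect_sections lines (collect_sections lines)

-- ===== LEMMAS AND PROOFS =====

-- the boundary entries at positions ≥ i, recursively over the index
def pvBF (lines : List String) (i : Nat) : List (Int × String) :=
  if i < lines.length then
    (if pvIsB (lines.getD i "") = true then [((i : Int), lines.getD i "")] else []) ++
      pvBF lines (i + 1)
  else []
termination_by lines.length - i

theorem pvBF_stop (lines : List String) (i : Nat) (h : ¬ i < lines.length) :
    pvBF lines i = [] := by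
  unfold pvBF; rw [if_neg h]

theorem pvBF_step (lines : List String) (i : Nat) (h : i < lines.length) :
    pvBF lines i =
      (if pvIsB (lines.getD i "") = true then [((i : Int), lines.getD i "")] else []) ++
        pvBF lines (i + 1) := by
  conv_lhs => unfold pvBF
  rw [if_pos h]

theorem pvScanA_head (lines : List String) (j : Nat) (hj : j ≤ lines.length) :
    (pvScanA lines j : Int) =
      (match pvBF lines j with
       | [] => (lines.length : Int)
       | (k, _) :: _ => k) := by
  unfold pvScanA
  split
  · rename_i h
    have hb : pvIsB (lines.getD j "") = false := Bool.eq_false_iff.mpr h.2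
    rw [pvBF_step lines j h.1, if_neg (by rw [hb]; exact Bool.false_ne_true), List.nil_append]
    exact pvScanA_head lines (j + 1) h.1
  · rename_i h
    by_cases hlt : j < lines.length
    · have hb : pvIsB (lines.getD j "") = true := not_not.mp (not_and.mp h hlt)
      rw [pvBF_step lines j hlt, if_pos hb, List.singleton_append]
    · have hj' : j = lines.length := by omega
      rw [pvBF_stop lines j hlt, hj']
termination_by lines.length - j
decreasing_by
  rename_i h; omega

theorem pvScanA_bF (lines : List String) (j : Nat) :
    pvBF lines (pvScanA lines j) = pvBF lines j := by
  unfold pvScanA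
  split
  · rename_i h
    have hb : pvIsB (lines.getD j "") = false := Bool.eq_false_iff.mpr h.2
    rw [pvScanA_bF lines (j + 1), pvBF_step lines j h.1,
        if_neg (by rw [hb]; exact Bool.false_ne_true), List.nil_append]
  · rfl
termination_by lines.length - j
decreasing_by
  rename_i h; omega

theorem pvLoopA_goB (lines : List String) (i : Nat) :
    pvLoopA lines i = pvGoB (lines.length : Int) (pvBF lines i) := by
  unfold pvLoopA
  split
  · rename_i h
    split
    · rename_i hs
      have hb : pvIsB (lines.getD i "") = true := by
        unfold pvIsB; rw [hs, Bool.true_or]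
      rw [pvBF_step lines i h, if_pos hb, List.singleton_append]
      simp only [pvGoB]
      rw [if_pos hs]
      rw [pvLoopA_goB lines (pvScanA lines (i + 1)), pvScanA_bF lines (i + 1),
          pvScanA_head lines (i + 1) h]
    · rename_i hs
      rw [pvLoopA_goB lines (i + 1), pvBF_step lines i h]
      by_cases hb : pvIsB (lines.getD i "") = true
      · rw [if_pos hb, List.singleton_append]
        simp only [pvGoB]
        rw [if_neg hs]
      · rw [if_neg hb, List.nil_append]
  · rename_i h
    rw [pvBF_stop lines i h]
    rfl
termination_by lines.length - i
decreasing_by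
  · omega
  · have := pvScanA_ge lines (i + 1); omega

-- pvBF agrees with the enumerate-comprehension over the dropped suffix
theorem pvBF_eq_filter (lines : List String) (i : Nat) :
    pvBF lines i =
      (PySem.List.enumerate (lines.drop i) (i : Int)).filter (fun p => pvIsB p.2) := by
  by_cases h : i < lines.length
  · obtain ⟨x, hx⟩ : ∃ x, lines[i]? = some x := ⟨lines[i], List.getElem?_eq_getElem h⟩
    have hdrop : lines.drop i = x :: lines.drop (i + 1) := by
      rw [List.drop_eq_getElem_cons h]
      have : lines[i] = x := by
        have := List.getElem?_eq_getElem h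
        rw [hx] at this; exact (Option.some.injEq _ _).mp this.symm
      rw [this]
    have hgetD : lines.getD i "" = x := by
      rw [List.getD_eq_getElem?_getD, hx]; rfl
    have hcast : ((i : Int) + 1) = ((i + 1 : Nat) : Int) := by push_cast; ring
    rw [pvBF_step lines i h, hdrop, PySem.List.enumerate_cons, List.filter_cons, hgetD,
        hcast, ← pvBF_eq_filter lines (i + 1)]
    by_cases hb : pvIsB x = true
    · rw [if_pos (by simpa using hb), if_pos hb, List.singleton_append]
    · rw [if_neg (by simpa using hb), if_neg hb, List.nil_append]
  · rw [pvBF_stop lines i h, List.drop_eq_nil_of_le (by omega)]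
    rfl
termination_by lines.length - i
decreasing_by
  omega

-- ===== VERDICT (by name: the statement is the Claim_ definition above) =====
theorem collect_sections_spec : Claim_equal_collect_sections := by
  intro lines _
  unfold Spec_collect_sections collect_sections collect_sections_alt
  rw [pvLoopA_goB lines 0, pvBF_eq_filter lines 0, List.drop_zero]
  norm_num
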